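-- pv_equiv track=rewrite | github.com/gouki510/Topology_of_Reasoning | src/utils.py | separate_double_and_revision_with_length
-- ===== SOURCE A (Python) =====
-- from typing import Any, List, Tuple, Dict
--
-- def separate_double_and_revision_with_length(
--     path: List[Any]
-- ) -> Tuple[List[Dict], List[Dict]]:
--     """
--     path: ノード遷移の時系列リスト
--     戻り値:
--       (double_checks, revisions)
--       - double_checks: 同じノード v で「同じ次ノード w」だった再訪情報 + 'length'
--       - revisions:    同じノード v で「異なる次ノード w」だった再訪情報
--
--     double-check の要素:
--       {
--         'node':      v,
--         'prev_idx':  i,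
--         'cur_idx':   j,
--         'prev_next': w,      # path[i+1]
--         'cur_next':  w,      # path[j+1]
--         'length':    L       # path[i:i+L] == path[j:j+L]
--       }
--     revision の要素は以前と同じ形式（length フィールドなし）です。
--     """
--     last_next: Dict[Any, Any] = {}
--     last_idx:  Dict[Any, int] = {}
--     double_checks: List[Dict] = []
--     revisions: List[Dict] = []
--     n = len(path)
--
--     for j in range(n - 1):
--         v = path[j]
--         w = path[j + 1]
--
--         if v in last_next:
--             i      = last_idx[v]
--             w_prev = last_next[v]
--             info = {
--                 'node':      v,
--                 'prev_idx':  i,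
--                 'cur_idx':   j,
--                 'prev_next': w_prev,
--                 'cur_next':  w
--             }
--
--             if w == w_prev:
--                 # 同じ次ノードなので "double-check"。ここで連続一致長 L を測る
--                 L = 0
--                 while i + L < n and j + L < n and path[i + L] == path[j + L]:
--                     L += 1
--                 info['length'] = L
--                 double_checks.append(info)
--             else:
--                 # 異なる次ノードなら "revision"
--                 revisions.append(info)
--
--         # 履歴を更新
--         last_next[v] = w
--         last_idx[v]  = j
--
--     return double_checks, revisions
-- ===== SOURCE B (Python) =====
-- def separate_double_and_revision_with_length(path):
--     n = len(path)
--     memo = {}  # (i, j) -> lcp of path[i:] and path[j:], shared across queries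
--
--     def _lcp(i, j):
--         # walk the diagonal until a memoised entry or a mismatch, then fill back
--         stack = []
--         while (i, j) not in memo:
--             if i < n and j < n and path[i] == path[j]:
--                 stack.append((i, j))
--                 i += 1
--                 j += 1
--             else:
--                 memo[(i, j)] = 0
--                 break
--         val = memo[(i, j)]
--         for key in reversed(stack):
--             val += 1
--             memo[key] = val
--         return val
--
--     last = {}  # v -> (last index of v, node that followed it)
--     double_checks = []
--     revisions = []
--     for j, (v, w) in enumerate(zip(path, path[1:])):
--         if v in last:
--             i, w_prev = last[v]
--             info = {
--                 'node':      v,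
--                 'prev_idx':  i,
--                 'cur_idx':   j,
--                 'prev_next': w_prev,
--                 'cur_next':  w
--             }
--             if w == w_prev:
--                 info['length'] = _lcp(i, j)
--                 double_checks.append(info)
--             else:
--                 revisions.append(info)
--         last[v] = (j, w)
--     return double_checks, revisions
-- ===== Notes on version B (the rewrite author's own statement) =====
-- stated objective: faster
-- what changed: A rescans the path from scratch for every double-check to measure the match length (O(n) per revisit, O(n^2) total); B memoises LCP values along each diagonal in a dict shared across queries, so each diagonal cell is computed once, and iterates with enumerate(zip(path, path[1:])) instead of indexing.
import Mathlib
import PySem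

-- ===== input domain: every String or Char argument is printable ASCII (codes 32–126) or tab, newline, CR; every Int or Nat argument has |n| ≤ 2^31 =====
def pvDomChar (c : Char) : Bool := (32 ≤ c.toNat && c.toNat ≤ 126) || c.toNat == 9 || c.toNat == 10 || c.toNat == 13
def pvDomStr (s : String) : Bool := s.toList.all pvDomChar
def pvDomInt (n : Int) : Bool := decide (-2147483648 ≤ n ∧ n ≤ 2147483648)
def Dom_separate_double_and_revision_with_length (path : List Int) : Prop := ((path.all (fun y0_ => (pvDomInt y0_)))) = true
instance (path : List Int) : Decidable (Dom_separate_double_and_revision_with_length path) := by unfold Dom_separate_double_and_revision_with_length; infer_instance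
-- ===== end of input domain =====

-- B replaces A's per-revisit O(n) rescan for the double-check length by a memoised diagonal
-- LCP table shared across all queries (same return value; faster on duplicate-heavy paths).
-- ===== PORT A =====
-- Port of A. A's inner while-loop measuring the match length L.
def lcpA (path : List Int) (n i j L : Int) : Int :=
  if h : i + L < n ∧ j + L < n ∧ PySem.List.pyGet? path (i + L) = PySem.List.pyGet? path (j + L) then
    lcpA path n i j (L + 1)
  else L
termination_by (n - (j + L)).toNat
decreasing_by omega

-- one iteration of A's main for-loop (state: last_next, last_idx, double_checks, revisions)
def stepA (path : List Int) (n : Int)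
    (st : PySem.Dict Int Int × PySem.Dict Int Int × List (List (String × Int)) × List (List (String × Int)))
    (j : Int) :
    PySem.Dict Int Int × PySem.Dict Int Int × List (List (String × Int)) × List (List (String × Int)) :=
  let v := PySem.List.pyGetD path j 0
  let w := PySem.List.pyGetD path (j + 1) 0
  let ln := st.1
  let li := st.2.1
  let dc := st.2.2.1
  let rv := st.2.2.2
  let st1 :=
    if ln.contains v then
      let i := li.getD v 0
      let wp := ln.getD v 0
      if w = wp then
        (ln, li,
         dc ++ [[("node", v), ("prev_idx", i), ("cur_idx", j), ("prev_next", wp), ("cur_next", w),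
                 ("length", lcpA path n i j 0)]],
         rv)
      else
        (ln, li, dc,
         rv ++ [[("node", v), ("prev_idx", i), ("cur_idx", j), ("prev_next", wp), ("cur_next", w)]])
    else (ln, li, dc, rv)
  (st1.1.insert v w, st1.2.1.insert v j, st1.2.2.1, st1.2.2.2)

def separate_double_and_revision_with_length (path : List Int) : (List (List (String × Int))) × (List (List (String × Int))) :=
  let n : Int := path.length
  let st := (PySem.List.pyRange 0 (n - 1) 1).foldl (stepA path n)
      (PySem.Dict.empty, PySem.Dict.empty, ([] : List (List (String × Int))), ([] : List (List (String × Int))))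
  (st.2.2.1, st.2.2.2)

-- ===== PORT B =====
-- Port of B. The memoised-diagonal LCP: collect the unmemoised diagonal, then fill back.
def bCollect (path : List Int) (n : Int) (memo : PySem.Dict (Int × Int) Int) (i j : Int)
    (stack : List (Int × Int)) :
    List (Int × Int) × PySem.Dict (Int × Int) Int × Int × Int :=
  match memo.get? (i, j) with
  | some _ => (stack, memo, i, j)
  | none =>
    if _h : i < n ∧ j < n ∧ PySem.List.pyGet? path i = PySem.List.pyGet? path j then
      bCollect path n memo (i + 1) (j + 1) (stack ++ [(i, j)])
    else (stack, memo.insert (i, j) 0, i, j)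
termination_by (n - j).toNat
decreasing_by omega

def bLcp (path : List Int) (n : Int) (memo : PySem.Dict (Int × Int) Int) (i j : Int) :
    Int × PySem.Dict (Int × Int) Int :=
  let r := bCollect path n memo i j []
  r.1.reverse.foldl (fun acc key => (acc.1 + 1, acc.2.insert key (acc.1 + 1)))
    (r.2.1.getD (r.2.2.1, r.2.2.2) 0, r.2.1)

-- one iteration of B's main for-loop (state: last, memo, double_checks, revisions)
def stepB (path : List Int) (n : Int)
    (st : PySem.Dict Int (Int × Int) × PySem.Dict (Int × Int) Int × List (List (String × Int)) × List (List (String × Int)))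
    (e : Int × Int × Int) :
    PySem.Dict Int (Int × Int) × PySem.Dict (Int × Int) Int × List (List (String × Int)) × List (List (String × Int)) :=
  let j := e.1
  let v := e.2.1
  let w := e.2.2
  let last := st.1
  let memo := st.2.1
  let dc := st.2.2.1
  let rv := st.2.2.2
  if last.contains v then
    let p := last.getD v (0, 0)
    let i := p.1
    let wp := p.2
    if w = wp then
      let r := bLcp path n memo i j
      (last.insert v (j, w), r.2,
       dc ++ [[("node", v), ("prev_idx", i), ("cur_idx", j), ("prev_next", wp), ("cur_next", w),
               ("length", r.1)]],
       rv)
    else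
      (last.insert v (j, w), memo, dc,
       rv ++ [[("node", v), ("prev_idx", i), ("cur_idx", j), ("prev_next", wp), ("cur_next", w)]])
  else (last.insert v (j, w), memo, dc, rv)

def separate_double_and_revision_with_length_alt (path : List Int) : (List (List (String × Int))) × (List (List (String × Int))) :=
  let n : Int := path.length
  let st := (PySem.List.enumerate (path.zip (PySem.List.slice path (some 1) none)) 0).foldl (stepB path n)
      (PySem.Dict.empty, PySem.Dict.empty, ([] : List (List (String × Int))), ([] : List (List (String × Int))))
  (st.2.2.1, st.2.2.2)

-- ===== PRECONDITION & SPEC =====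
def Spec_separate_double_and_revision_with_length (path : List Int) (out : (List (List (String × Int))) × (List (List (String × Int)))) : Prop := out = separate_double_and_revision_with_length_alt path
instance (path : List Int) (out : (List (List (String × Int))) × (List (List (String × Int)))) : Decidable (Spec_separate_double_and_revision_with_length path out) := by unfold Spec_separate_double_and_revision_with_length; infer_instance

-- ===== CLAIM (what is proved, stated in full; the proofs are below) =====
def Claim_equal_separate_double_and_revision_with_length : Prop := ∀ (path : List Int), Dom_separate_double_and_revision_with_length path → Spec_separate_double_and_revision_with_length path (separate_double_and_revision_with_length path)

-- ===== LEMMAS AND PROOFS =====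

-- reference value: length of the common prefix of path[i:] and path[j:] (bounded by n)
def lcpSpec (path : List Int) (n i j : Int) : Int :=
  if h : i < n ∧ j < n ∧ PySem.List.pyGet? path i = PySem.List.pyGet? path j then
    1 + lcpSpec path n (i + 1) (j + 1)
  else 0
termination_by (n - j).toNat
decreasing_by omega

-- every entry of B's memo table is a correct lcp value
def MemoOK (path : List Int) (n : Int) (m : PySem.Dict (Int × Int) Int) : Prop :=
  ∀ p L, m.get? p = some L → L = lcpSpec path n p.1 p.2

-- the diagonal segment B's collect phase walks: consecutive matching pairs
inductive DiagChain (path : List Int) (n : Int) : Int → Int → Int → Int → List (Int × Int) → Prop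
  | nil (i j : Int) : DiagChain path n i j i j []
  | cons (i j i2 j2 : Int) (t : List (Int × Int))
      (hc : i < n ∧ j < n ∧ PySem.List.pyGet? path i = PySem.List.pyGet? path j)
      (ht : DiagChain path n (i + 1) (j + 1) i2 j2 t) :
      DiagChain path n i j i2 j2 ((i, j) :: t)

lemma lcpA_eq (path : List Int) (n i j L : Int) :
    lcpA path n i j L = L + lcpSpec path n (i + L) (j + L) := by
  fun_induction lcpA path n i j L with
  | case1 L h ih =>
    rw [lcpSpec, dif_pos h, ih]
    have e1 : i + (L + 1) = i + L + 1 := by ring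
    have e2 : j + (L + 1) = j + L + 1 := by ring
    rw [e1, e2]; ring
  | case2 L h =>
    rw [lcpSpec, dif_neg h]; ring

lemma bCollect_spec (path : List Int) (n : Int) (memo : PySem.Dict (Int × Int) Int)
    (i j : Int) (stack : List (Int × Int)) (hm : MemoOK path n memo) :
    ∃ t m' i2 j2, bCollect path n memo i j stack = (stack ++ t, m', i2, j2) ∧
      DiagChain path n i j i2 j2 t ∧ MemoOK path n m' ∧
      m'.getD (i2, j2) 0 = lcpSpec path n i2 j2 := by
  fun_induction bCollect path n memo i j stack with
  | case1 i j stack L hL =>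
    refine ⟨[], memo, i, j, by simp, DiagChain.nil i j, hm, ?_⟩
    rw [PySem.Dict.getD_eq_get?_getD, hL]
    exact hm (i, j) L hL
  | case2 i j stack hL h ih =>
    obtain ⟨t, m', i2, j2, he, hch, hm', hg⟩ := ih
    exact ⟨(i, j) :: t, m', i2, j2, by simpa using he, DiagChain.cons i j i2 j2 t h hch, hm', hg⟩
  | case3 i j stack hL h =>
    refine ⟨[], memo.insert (i, j) 0, i, j, by simp, DiagChain.nil i j, ?_, ?_⟩
    · intro p L hg
      rw [PySem.Dict.get?_insert] at hg
      by_cases hp : p = (i, j)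
      · rw [if_pos hp] at hg
        cases hg
        subst hp
        rw [lcpSpec, dif_neg h]
      · rw [if_neg hp] at hg
        exact hm p L hg
    · rw [PySem.Dict.getD_insert, if_pos rfl, lcpSpec, dif_neg h]

lemma fill_spec (path : List Int) (n : Int) {i j i2 j2 : Int} {t : List (Int × Int)}
    (hch : DiagChain path n i j i2 j2 t) :
    ∀ m, MemoOK path n m →
    ∃ m', t.reverse.foldl (fun acc key => (acc.1 + 1, acc.2.insert key (acc.1 + 1)))
        (lcpSpec path n i2 j2, m) = (lcpSpec path n i j, m') ∧ MemoOK path n m' := by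
  induction hch with
  | nil i j => exact fun m hm => ⟨m, rfl, hm⟩
  | cons i j i2 j2 t hc hch ih =>
    intro m hm
    obtain ⟨m', he, hm'⟩ := ih m hm
    have hl : lcpSpec path n i j = lcpSpec path n (i + 1) (j + 1) + 1 := by
      rw [lcpSpec, dif_pos hc]; ring
    refine ⟨m'.insert (i, j) (lcpSpec path n i j), ?_, ?_⟩
    · rw [List.reverse_cons, List.foldl_append, he]
      simp only [List.foldl_cons, List.foldl_nil]
      rw [← hl]
    · intro p L hg
      rw [PySem.Dict.get?_insert] at hg
      by_cases hp : p = (i, j)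
      · rw [if_pos hp] at hg
        cases hg
        subst hp
        rfl
      · rw [if_neg hp] at hg
        exact hm' p L hg

lemma bLcp_spec (path : List Int) (n : Int) (memo : PySem.Dict (Int × Int) Int)
    (i j : Int) (hm : MemoOK path n memo) :
    ∃ m', bLcp path n memo i j = (lcpSpec path n i j, m') ∧ MemoOK path n m' := by
  obtain ⟨t, m1, i2, j2, he, hch, hm1, hg⟩ := bCollect_spec path n memo i j [] hm
  obtain ⟨m', hfill, hm'⟩ := fill_spec path n hch m1 hm1
  refine ⟨m', ?_, hm'⟩
  unfold bLcp
  rw [he]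
  simp only [List.nil_append]
  rw [hg, hfill]

lemma getElem_enumerate {α : Type} : ∀ (xs : List α) (s : Int) (k : Nat) (hk : k < xs.length),
    (PySem.List.enumerate xs s)[k]'(by rw [PySem.List.length_enumerate]; exact hk) = (s + k, xs[k]) := by
  intro xs
  induction xs with
  | nil => intro s k hk; simp at hk
  | cons x xs ih =>
    intro s k hk
    simp only [PySem.List.enumerate_cons]
    cases k with
    | zero => simp
    | succ k =>
      have h2 : k < xs.length := by simpa using hk
      have := ih (s + 1) k h2
      simp only [List.getElem_cons_succ, this]
      have : s + 1 + (k : Int) = s + ((k : Nat) + 1 : Nat) := by push_cast; ring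
      rw [this]

lemma enumZip_eq (path : List Int) :
    PySem.List.enumerate (path.zip (PySem.List.slice path (some 1) none)) 0 =
      (PySem.List.pyRange 0 ((path.length : Int) - 1) 1).map
        (fun j => (j, PySem.List.pyGetD path j 0, PySem.List.pyGetD path (j + 1) 0)) := by
  rw [PySem.List.slice_from_one]
  apply List.ext_getElem
  · simp [PySem.List.length_enumerate, PySem.List.length_pyRange_one]
  · intro k h1 h2
    have hk : k < (path.zip path.tail).length := by
      simpa [PySem.List.length_enumerate] using h1
    have hkp : k + 1 < path.length := by
      simp [List.length_zip, List.length_tail] at hk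
      omega
    rw [getElem_enumerate (path.zip path.tail) 0 k hk]
    have hkr : k < ((PySem.List.pyRange 0 ((path.length : Int) - 1) 1).length) := by
      simpa using h2
    simp only [List.getElem_map, PySem.List.getElem_pyRange_one]
    simp [List.getElem_zip, List.getElem_tail, PySem.List.pyGetD_natCast]
    constructor
    · simp [List.getElem?_eq_getElem (show k < path.length by omega)]
    · rw [show (k : Int) + 1 = ((k + 1 : Nat) : Int) by push_cast; ring,
        PySem.List.pyGetD_natCast]
      simp [hkp]

lemma foldl_rel {α σ τ : Type} (R : σ → τ → Prop) (fA : σ → α → σ) (fB : τ → α → τ) :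
    ∀ (l : List α) (s : σ) (t : τ), R s t → (∀ a ∈ l, ∀ s t, R s t → R (fA s a) (fB t a)) →
      R (l.foldl fA s) (l.foldl fB t) := by
  intro l
  induction l with
  | nil => intro s t h _; exact h
  | cons a l ih =>
    intro s t h hstep
    exact ih _ _ (hstep a (by simp) s t h) (fun b hb => hstep b (by simp [hb]))

-- the relation between A's loop state and B's loop state
def StateR (path : List Int) (n : Int)
    (s : PySem.Dict Int Int × PySem.Dict Int Int × List (List (String × Int)) × List (List (String × Int)))
    (t : PySem.Dict Int (Int × Int) × PySem.Dict (Int × Int) Int × List (List (String × Int)) × List (List (String × Int))) : Prop :=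
  (∀ v, s.1.get? v = (t.1.get? v).map Prod.snd) ∧
  (∀ v, s.2.1.get? v = (t.1.get? v).map Prod.fst) ∧
  MemoOK path n t.2.1 ∧ s.2.2.1 = t.2.2.1 ∧ s.2.2.2 = t.2.2.2

lemma insert_rel {lnA liA : PySem.Dict Int Int} {lB : PySem.Dict Int (Int × Int)}
    (h1 : ∀ x, lnA.get? x = (lB.get? x).map Prod.snd)
    (h2 : ∀ x, liA.get? x = (lB.get? x).map Prod.fst) (v w j : Int) :
    (∀ x, (lnA.insert v w).get? x = ((lB.insert v (j, w)).get? x).map Prod.snd) ∧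
    (∀ x, (liA.insert v j).get? x = ((lB.insert v (j, w)).get? x).map Prod.fst) := by
  constructor <;> intro x <;>
    rw [PySem.Dict.get?_insert, PySem.Dict.get?_insert] <;> split_ifs <;>
      simp [h1 x, h2 x]

lemma step_rel (path : List Int) (n : Int) (j : Int) (s t) (hR : StateR path n s t) :
    StateR path n (stepA path n s j)
      (stepB path n t (j, PySem.List.pyGetD path j 0, PySem.List.pyGetD path (j + 1) 0)) := by
  obtain ⟨h1, h2, hm, h3, h4⟩ := hR
  have hc : s.1.contains (PySem.List.pyGetD path j 0) = t.1.contains (PySem.List.pyGetD path j 0) := by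
    rw [PySem.Dict.contains_eq_isSome_get?, PySem.Dict.contains_eq_isSome_get?, h1]
    cases t.1.get? (PySem.List.pyGetD path j 0) <;> rfl
  set v := PySem.List.pyGetD path j 0 with hv
  set w := PySem.List.pyGetD path (j + 1) 0 with hw
  by_cases hct : t.1.contains v = true
  · obtain ⟨iw, hiw⟩ : ∃ p, t.1.get? v = some p := by
      rw [PySem.Dict.contains_eq_isSome_get?] at hct
      exact Option.isSome_iff_exists.mp hct
    have hwp : s.1.getD v 0 = iw.2 := by
      rw [PySem.Dict.getD_eq_get?_getD, h1, hiw]; rfl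
    have hi : s.2.1.getD v 0 = iw.1 := by
      rw [PySem.Dict.getD_eq_get?_getD, h2, hiw]; rfl
    have hip : t.1.getD v (0, 0) = iw := by
      rw [PySem.Dict.getD_eq_get?_getD, hiw]; rfl
    have hins := insert_rel h1 h2 v w j
    by_cases heq : w = iw.2
    · rw [heq] at hins
      obtain ⟨m', hbl, hm'⟩ := bLcp_spec path n t.2.1 iw.1 j hm
      have hA : lcpA path n iw.1 j 0 = lcpSpec path n iw.1 j := by
        have := lcpA_eq path n iw.1 j 0
        simpa using this
      simp only [stepA, stepB, ← hv, ← hw, hc, hct, if_true, hwp, hi, hip, heq,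
        hbl, hA, h3, h4]
      exact ⟨hins.1, hins.2, hm', rfl, rfl⟩
    · simp only [stepA, stepB, ← hv, ← hw, hc, hct, if_true, hwp, hi, hip, if_neg heq, h3, h4]
      exact ⟨hins.1, hins.2, hm, rfl, rfl⟩
  · have hins := insert_rel h1 h2 v w j
    simp only [stepA, stepB, ← hv, ← hw, hc, hct, h3, h4]
    exact ⟨hins.1, hins.2, hm, rfl, rfl⟩

-- ===== VERDICT (by name: the statement is the Claim_ definition above) =====
theorem separate_double_and_revision_with_length_spec : Claim_equal_separate_double_and_revision_with_length := by
  intro path _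
  unfold Spec_separate_double_and_revision_with_length
  unfold separate_double_and_revision_with_length separate_double_and_revision_with_length_alt
  rw [enumZip_eq]
  simp only [List.foldl_map]
  have hfin := foldl_rel (StateR path (path.length : Int))
      (stepA path (path.length : Int))
      (fun t j => stepB path (path.length : Int) t (j, PySem.List.pyGetD path j 0, PySem.List.pyGetD path (j + 1) 0))
      (PySem.List.pyRange 0 ((path.length : Int) - 1) 1)
      (PySem.Dict.empty, PySem.Dict.empty, [], []) (PySem.Dict.empty, PySem.Dict.empty, [], [])
      ⟨fun v => by simp [PySem.Dict.get?_empty], fun v => by simp [PySem.Dict.get?_empty],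
       fun p L h => by simp [PySem.Dict.get?_empty] at h, rfl, rfl⟩
      (fun a _ s t h => step_rel path (path.length : Int) a s t h)
  obtain ⟨_, _, _, h3, h4⟩ := hfin
  exact Prod.ext h3 h4
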